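-- pv_equiv track=rewrite | github.com/DreamOfTheRedChamber/leetcode | company-specific/anagram.py | findSimilarRestaurants
-- ===== SOURCE A (Python) =====
-- def findSimilarRestaurants(name, inputList):
--
--     result = []
--     for index, toCompare in enumerate(inputList):
--
--         if len(toCompare) != len(name):
--             continue
--
--         firstMismatch = False
--         firstMismatchIndex = 0
--         secondMismatch = False
--         isOpposite = False
--         for strPos in range(len(name)):
--             if name[strPos] != toCompare[strPos]:
--                 if secondMismatch:
--                     isOpposite = False
--                     break
--                 elif not firstMismatch:
--                     firstMismatchIndex = strPos
--                     firstMismatch = True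
--                 else:
--                     isOpposite = name[strPos] == toCompare[firstMismatchIndex] and name[firstMismatchIndex] == toCompare[strPos]
--                     secondMismatch = True
--
--         if not firstMismatch or isOpposite:
--             result.append(toCompare)
--
--     return result
-- ===== SOURCE B (Python) =====
-- def findSimilarRestaurants(name, inputList):
--     # Generate-and-test: precompute the set of all acceptable strings
--     # (name itself plus every single transposition of two unequal positions),
--     # then keep the inputs that are members of that set.
--     chars = list(name)
--     n = len(chars)
--     candidates = {name}
--     for i in range(n):
--         for j in range(i + 1, n):
--             if chars[i] != chars[j]:
--                 swapped = chars[:]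
--                 swapped[i], swapped[j] = swapped[j], swapped[i]
--                 candidates.add(''.join(swapped))
--     return [t for t in inputList if t in candidates]
-- ===== Notes on version B (the rewrite author's own statement) =====
-- stated objective: alternative
-- what changed: Replaces A's per-candidate character-scan state machine by a generate-and-test algorithm: precompute the set of all acceptable strings (name plus every transposition of two unequal positions) once, then keep inputs by set membership.
import Mathlib
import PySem

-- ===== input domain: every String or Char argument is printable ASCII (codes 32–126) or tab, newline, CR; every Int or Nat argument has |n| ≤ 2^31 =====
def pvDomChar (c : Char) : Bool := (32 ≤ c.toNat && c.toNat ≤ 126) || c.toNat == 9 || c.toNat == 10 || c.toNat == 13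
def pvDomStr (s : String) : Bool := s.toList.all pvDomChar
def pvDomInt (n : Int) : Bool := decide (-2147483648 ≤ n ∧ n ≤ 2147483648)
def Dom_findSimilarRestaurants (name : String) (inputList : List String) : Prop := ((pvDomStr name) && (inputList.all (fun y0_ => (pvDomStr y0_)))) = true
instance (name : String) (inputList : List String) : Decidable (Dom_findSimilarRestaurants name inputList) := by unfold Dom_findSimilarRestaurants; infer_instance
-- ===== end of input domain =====

-- B replaces A's per-candidate scanning state machine by generate-and-test: build the set
-- of all acceptable strings once, then filter the input by set membership.

-- shared thin accessor for Python's s[i] (Option Char; both Pythons only index in range)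
def pvGet (s : String) (i : Int) : Option Char := PySem.Str.pyGet? s i

-- ===== PORT A =====
-- the inner 'for strPos in range(len(name))' loop with its early break; returns the
-- final 'not firstMismatch or isOpposite' test A performs after the loop
def pvALoop (name t : String) (ks : List Int) (fm : Bool) (fmi : Int) (sm iso : Bool) : Bool :=
  match ks with
  | [] => (!fm) || iso
  | k :: ks =>
    if pvGet name k ≠ pvGet t k then
      if sm then (!fm) || false          -- isOpposite = False; break
      else if !fm then pvALoop name t ks true k sm iso
      else pvALoop name t ks fm fmi true
             (decide (pvGet name k = pvGet t fmi) && decide (pvGet name fmi = pvGet t k))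
    else pvALoop name t ks fm fmi sm iso

def pvAOuter (name : String) (rest : List String) (result : List String) : List String :=
  match rest with
  | [] => result
  | t :: rest =>
    if PySem.Str.len t ≠ PySem.Str.len name then pvAOuter name rest result
    else if pvALoop name t (PySem.List.pyRange 0 (PySem.Str.len name) 1) false 0 false false
    then pvAOuter name rest (result ++ [t])
    else pvAOuter name rest result

def findSimilarRestaurants (name : String) (inputList : List String) : List String :=
  pvAOuter name inputList []

-- ===== PORT B =====
-- 'swapped = chars[:]; swapped[i], swapped[j] = swapped[j], swapped[i]' (indices in range)
def pvSwapAt (cs : List Char) (i j : Int) : List Char :=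
  PySem.List.pySetD (PySem.List.pySetD cs i (PySem.List.pyGetD cs j ' ')) j
    (PySem.List.pyGetD cs i ' ')

-- the candidate set {name} ∪ {name with positions i<j swapped, chars differing};
-- strings are represented by their code-point lists (list(name) / ''.join)
def pvCandidates (name : String) : PySem.Set (List Char) :=
  let chars := name.toList
  let n : Int := PySem.Str.len name
  (PySem.List.pyRange 0 n 1).foldl (fun s i =>
    (PySem.List.pyRange (i + 1) n 1).foldl (fun s j =>
      if PySem.List.pyGetD chars i ' ' ≠ PySem.List.pyGetD chars j ' '
      then PySem.Set.add s (pvSwapAt chars i j) else s) s)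
    (PySem.Set.ofList [chars])

def findSimilarRestaurants_alt (name : String) (inputList : List String) : List String :=
  inputList.filter (fun t => PySem.Set.contains (pvCandidates name) t.toList)

-- ===== PRECONDITION & SPEC =====
def Spec_findSimilarRestaurants (name : String) (inputList : List String) (out : List String) : Prop := out = findSimilarRestaurants_alt name inputList
instance (name : String) (inputList : List String) (out : List String) : Decidable (Spec_findSimilarRestaurants name inputList out) := by unfold Spec_findSimilarRestaurants; infer_instance

-- ===== CLAIM (what is proved, stated in full; the proofs are below) =====
def Claim_equal_findSimilarRestaurants : Prop := ∀ (name : String) (inputList : List String), Dom_findSimilarRestaurants name inputList → Spec_findSimilarRestaurants name inputList (findSimilarRestaurants name inputList)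

-- ===== LEMMAS AND PROOFS =====

-- A-SIDE: the inner loop decides "no mismatch, or exactly two mutually swapped mismatches"

theorem pvALoop_state2 (name t : String) (ks : List Int) (fmi : Int) (iso : Bool) :
    pvALoop name t ks true fmi true iso =
      if ks.filter (fun i => pvGet name i != pvGet t i) = [] then iso else false := by
  induction ks with
  | nil => simp [pvALoop]
  | cons k ks ih =>
    by_cases h : pvGet name k = pvGet t k <;>
      simp [pvALoop, h, ih]

theorem pvALoop_state1 (name t : String) (ks : List Int) (fmi : Int) :
    pvALoop name t ks true fmi false false =
      (match ks.filter (fun i => pvGet name i != pvGet t i) with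
       | [j] => decide (pvGet name j = pvGet t fmi) && decide (pvGet name fmi = pvGet t j)
       | _ => false) := by
  induction ks with
  | nil => simp [pvALoop]
  | cons k ks ih =>
    by_cases h : pvGet name k = pvGet t k
    · simp [pvALoop, h, ih]
    · simp only [pvALoop, h, ne_eq, not_false_eq_true, if_true, Bool.not_true,
        Bool.false_eq_true, if_false, pvALoop_state2, List.filter_cons,
        bne_iff_ne, ne_eq]
      split
      · rename_i hnil
        simp [hnil]
      · rename_i hne
        cases hh : ks.filter (fun i => pvGet name i != pvGet t i) with
        | nil => exact absurd hh hne
        | cons a as => simp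

theorem pvALoop_initial (name t : String) (ks : List Int) :
    pvALoop name t ks false 0 false false =
      ((ks.filter (fun i => pvGet name i != pvGet t i)).isEmpty ||
         (match ks.filter (fun i => pvGet name i != pvGet t i) with
          | [i, j] => decide (pvGet name i = pvGet t j) && decide (pvGet name j = pvGet t i)
          | _ => false)) := by
  induction ks with
  | nil => simp [pvALoop]
  | cons k ks ih =>
    by_cases h : pvGet name k = pvGet t k
    · simpa [pvALoop, h, List.filter_cons] using ih
    · simp only [pvALoop, h, ne_eq, not_false_eq_true, Bool.not_false,
        if_pos, pvALoop_state1, List.filter_cons, bne_iff_ne]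
      cases hh : ks.filter (fun i => pvGet name i != pvGet t i) with
      | nil => simp
      | cons a as =>
        cases as with
        | nil => simp [Bool.and_comm]
        | cons b bs => simp

-- B-SIDE: membership in the generated candidate set

-- nat-level swap, the value pvSwapAt computes on in-range nat indices
def pvSwapN (cs : List Char) (i j : Nat) : List Char :=
  (cs.set i (cs.getD j ' ')).set j (cs.getD i ' ')

theorem pvLength_swapN (cs : List Char) (i j : Nat) :
    (pvSwapN cs i j).length = cs.length := by
  simp [pvSwapN]

theorem pvSwapAt_natCast (cs : List Char) (i j : Nat) :
    pvSwapAt cs (i : Int) (j : Int) = pvSwapN cs i j := by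
  unfold pvSwapAt pvSwapN
  rw [PySem.List.pyGetD_of_nonneg cs ' ' (by omega : (0:Int) ≤ (j:Int)),
      PySem.List.pyGetD_of_nonneg cs ' ' (by omega : (0:Int) ≤ (i:Int)),
      PySem.List.pySetD_of_nonneg _ _ (by omega : (0:Int) ≤ (i:Int)),
      PySem.List.pySetD_of_nonneg _ _ (by omega : (0:Int) ≤ (j:Int))]
  simp

-- membership through a fold that only ever adds elements
theorem pvMem_foldl_gen {α β : Type} [BEq α] [LawfulBEq α]
    (F : PySem.Set α → β → PySem.Set α) (Q : β → α → Prop)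
    (hF : ∀ s e x, x ∈ F s e ↔ x ∈ s ∨ Q e x) (l : List β) (s : PySem.Set α) (x : α) :
    (x ∈ l.foldl F s) ↔ x ∈ s ∨ ∃ e ∈ l, Q e x := by
  induction l generalizing s with
  | nil => simp
  | cons e l ih =>
    rw [List.foldl_cons, ih, hF]
    constructor
    · rintro ((hs | hq) | ⟨e', he', hq⟩)
      · exact Or.inl hs
      · exact Or.inr ⟨e, List.mem_cons_self, hq⟩
      · exact Or.inr ⟨e', List.mem_cons_of_mem _ he', hq⟩
    · rintro (hs | ⟨e', he', hq⟩)
      · exact Or.inl (Or.inl hs)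
      · rcases List.mem_cons.mp he' with rfl | h
        · exact Or.inl (Or.inr hq)
        · exact Or.inr ⟨e', h, hq⟩

theorem pvMem_candidates (name : String) (u : List Char) :
    u ∈ pvCandidates name ↔
      u = name.toList ∨
      ∃ i j : Nat, i < j ∧ j < name.toList.length ∧
        name.toList.getD i ' ' ≠ name.toList.getD j ' ' ∧ u = pvSwapN name.toList i j := by
  have hmem : u ∈ pvCandidates name ↔
      u ∈ PySem.Set.ofList [name.toList] ∨
      ∃ i ∈ PySem.List.pyRange 0 (PySem.Str.len name) 1,
        ∃ j ∈ PySem.List.pyRange (i + 1) (PySem.Str.len name) 1,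
          (PySem.List.pyGetD name.toList i ' ' ≠ PySem.List.pyGetD name.toList j ' ') ∧
            u = pvSwapAt name.toList i j := by
    exact pvMem_foldl_gen _
      (fun (i : Int) (x : List Char) =>
        ∃ j ∈ PySem.List.pyRange (i + 1) (PySem.Str.len name) 1,
          (PySem.List.pyGetD name.toList i ' ' ≠ PySem.List.pyGetD name.toList j ' ') ∧
            x = pvSwapAt name.toList i j)
      (fun s i x => pvMem_foldl_gen _
        (fun (j : Int) (x : List Char) =>
          (PySem.List.pyGetD name.toList i ' ' ≠ PySem.List.pyGetD name.toList j ' ') ∧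
            x = pvSwapAt name.toList i j)
        (fun s j x => by
          by_cases hc : PySem.List.pyGetD name.toList i ' ' ≠ PySem.List.pyGetD name.toList j ' '
          · simp [hc, PySem.Set.mem_add]
          · simp [hc])
        _ s x)
      _ _ u
  rw [hmem]
  have hn := PySem.Str.len_eq name
  simp only [PySem.Set.mem_ofList, List.mem_singleton, PySem.List.mem_pyRange_one]
  constructor
  · rintro (h | ⟨i, ⟨hi0, hin⟩, j, ⟨hji, hjn⟩, hne, hx⟩)
    · exact Or.inl h
    · have hi : ((i.toNat : Nat) : Int) = i := by omega
      have hj : ((j.toNat : Nat) : Int) = j := by omega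
      refine Or.inr ⟨i.toNat, j.toNat, by omega, by omega, ?_, ?_⟩
      · rw [← hi, ← hj, PySem.List.pyGetD_natCast, PySem.List.pyGetD_natCast] at hne
        exact hne
      · rw [← hi, ← hj, pvSwapAt_natCast] at hx
        exact hx
  · rintro (h | ⟨i, j, hij, hjn, hne, hx⟩)
    · exact Or.inl h
    · refine Or.inr ⟨(i : Int), ⟨by omega, by omega⟩, (j : Int), ⟨by omega, by omega⟩, ?_, ?_⟩
      · rw [PySem.List.pyGetD_natCast, PySem.List.pyGetD_natCast]
        exact hne
      · rw [hx, pvSwapAt_natCast]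

-- filter of range picking out exactly no / one / two indices
theorem pvFilterRange_nil (n : Nat) (p : Nat → Bool) (hp : ∀ k < n, p k = false) :
    (List.range n).filter p = [] := by
  rw [List.filter_eq_nil_iff]
  intro k hk
  simp [hp k (List.mem_range.mp hk)]

theorem pvFilterRange_single (n i : Nat) (hi : i < n) (p : Nat → Bool)
    (hp : ∀ k < n, p k = decide (k = i)) :
    (List.range n).filter p = [i] := by
  induction n with
  | zero => omega
  | succ n ih =>
    rw [List.range_succ, List.filter_append]
    by_cases h : i = n
    · rw [pvFilterRange_nil n p (fun k hk => by rw [hp k (by omega)]; simp; omega)]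
      simp [hp n (by omega), h]
    · rw [ih (by omega) (fun k hk => hp k (by omega))]
      have hpn : p n = false := by rw [hp n (by omega)]; simp; omega
      simp [hpn]

theorem pvFilterRange_pair (n i j : Nat) (hij : i < j) (hj : j < n) (p : Nat → Bool)
    (hp : ∀ k < n, p k = (decide (k = i) || decide (k = j))) :
    (List.range n).filter p = [i, j] := by
  induction n with
  | zero => omega
  | succ n ih =>
    rw [List.range_succ, List.filter_append]
    by_cases h : j = n
    · rw [pvFilterRange_single n i (by omega) p
        (fun k hk => by rw [hp k (by omega)]; simp; omega)]
      simp [hp n (by omega), h]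
    · rw [ih (by omega) (fun k hk => hp k (by omega))]
      have hpn : p n = false := by rw [hp n (by omega)]; simp; omega
      simp [hpn]

theorem pvGet_natCast (s : String) (k : Nat) (hk : k < s.toList.length) :
    pvGet s (k : Nat) = some (s.toList.getD k ' ') := by
  simp [pvGet, PySem.Str.pyGet?, List.getElem?_eq_getElem hk]

theorem pvBneSome (a b : Char) : (some a != some b) = (a != b) := rfl

-- Python-index mismatch list rewritten with nat indices (for strings of equal length)
theorem pvDiffs_map (name t : String) (hlen : t.toList.length = name.toList.length) :
    (PySem.List.pyRange 0 (PySem.Str.len name) 1).filter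
        (fun i => pvGet name i != pvGet t i) =
      ((List.range name.toList.length).filter
        (fun k => name.toList.getD k ' ' != t.toList.getD k ' ')).map
        (fun k : Nat => (k : Int)) := by
  rw [PySem.Str.len_eq, PySem.List.pyRange_zero_natCast, List.filter_map]
  congr 1
  apply List.filter_congr
  intro k hk
  have hk' : k < name.toList.length := List.mem_range.mp hk
  have hk'' : k < t.toList.length := by omega
  simp only [Function.comp_apply, pvGet_natCast name k hk', pvGet_natCast t k hk'']
  exact pvBneSome _ _

-- the candidate set agrees with A's inner-loop test on every string
theorem pvCheck_eq (name t : String) :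
    (decide (PySem.Str.len t = PySem.Str.len name) &&
      pvALoop name t (PySem.List.pyRange 0 (PySem.Str.len name) 1) false 0 false false) =
      PySem.Set.contains (pvCandidates name) t.toList := by
  have hlenname := PySem.Str.len_eq name
  have hlent := PySem.Str.len_eq t
  by_cases hlen : t.toList.length = name.toList.length
  · -- equal lengths: compare the two tests via the mismatch-index list
    have h1 : decide (PySem.Str.len t = PySem.Str.len name) = true := by
      rw [hlenname, hlent, hlen]; simp
    rw [h1, Bool.true_and, pvALoop_initial, pvDiffs_map name t hlen,
        Bool.eq_iff_iff, PySem.Set.contains_iff, pvMem_candidates]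
    constructor
    · intro h
      rcases hdd : (List.range name.toList.length).filter
          (fun k => name.toList.getD k ' ' != t.toList.getD k ' ') with _ | ⟨i, _ | ⟨j, _ | ⟨c, rest⟩⟩⟩
      · -- no mismatch: the strings are equal
        left
        apply List.ext_getElem hlen
        intro k hk1 hk2
        have hk : ¬ (name.toList.getD k ' ' != t.toList.getD k ' ') = true := by
          intro hne
          have : k ∈ (List.range name.toList.length).filter
              (fun k => name.toList.getD k ' ' != t.toList.getD k ' ') :=
            List.mem_filter.mpr ⟨List.mem_range.mpr hk2, hne⟩
          rw [hdd] at this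
          simp at this
        simp only [bne_iff_ne, ne_eq, Decidable.not_not] at hk
        rw [List.getD_eq_getElem _ _ hk2, List.getD_eq_getElem _ _ hk1] at hk
        exact hk.symm
      · rw [hdd] at h; simp at h
      · -- exactly two mismatches, mutually swapped
        rw [hdd] at h
        simp only [List.map_cons, List.map_nil, List.isEmpty_cons, Bool.false_or] at h
        have hmemf : ∀ x ∈ [i, j], x < name.toList.length ∧
            (name.toList.getD x ' ' != t.toList.getD x ' ') = true := by
          intro x hx
          rw [← hdd] at hx
          have := List.mem_filter.mp hx
          exact ⟨List.mem_range.mp this.1, this.2⟩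
        have hi := hmemf i (by simp)
        have hj := hmemf j (by simp)
        have hij : i < j := by
          have hpw : ((List.range name.toList.length).filter
              (fun k => name.toList.getD k ' ' != t.toList.getD k ' ')).Pairwise (· < ·) :=
            List.Pairwise.filter _ List.pairwise_lt_range
          rw [hdd] at hpw
          exact (List.pairwise_cons.mp hpw).1 j (by simp)
        rw [pvGet_natCast name i hi.1, pvGet_natCast name j hj.1,
            pvGet_natCast t i (by omega), pvGet_natCast t j (by omega)] at h
        simp only [Bool.and_eq_true, decide_eq_true_eq, Option.some.injEq] at h
        right
        have hnij : name.toList.getD i ' ' ≠ name.toList.getD j ' ' := by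
          have := hj.2
          simp only [bne_iff_ne, ne_eq] at this
          intro hcontra
          exact this (by rw [← hcontra, h.1])
        refine ⟨i, j, hij, hj.1, hnij, ?_⟩
        apply List.ext_getElem (by rw [pvLength_swapN]; exact hlen)
        intro k hk1 hk2
        simp only [pvSwapN] at hk2 ⊢
        rw [List.getElem_set, List.getElem_set]
        by_cases hkj : j = k
        · subst hkj
          rw [if_pos rfl, ← List.getD_eq_getElem _ ' ' hk1]
          exact h.1.symm
        · rw [if_neg hkj]
          by_cases hki : i = k
          · subst hki
            rw [if_pos rfl, ← List.getD_eq_getElem _ ' ' hk1]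
            exact h.2.symm
          · rw [if_neg hki]
            have hklt : k < name.toList.length := by
              simp only [List.length_set] at hk2; exact hk2
            have hknot : k ∉ (List.range name.toList.length).filter
                (fun k => name.toList.getD k ' ' != t.toList.getD k ' ') := by
              rw [hdd]
              simp only [List.mem_cons, List.not_mem_nil, or_false]
              rintro (hc | hc)
              · exact hki hc.symm
              · exact hkj hc.symm
            have : ¬ (name.toList.getD k ' ' != t.toList.getD k ' ') = true := by
              intro hne
              exact hknot (List.mem_filter.mpr ⟨List.mem_range.mpr hklt, hne⟩)
            simp only [bne_iff_ne, ne_eq, Decidable.not_not] at this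
            rw [List.getD_eq_getElem _ _ hklt, List.getD_eq_getElem _ _ hk1] at this
            exact this.symm
      · -- three or more mismatches: A's test is false, contradiction with h
        rw [hdd] at h; simp at h
    · rintro (h | ⟨i, j, hij, hjn, hne, hx⟩)
      · -- t equals name: the mismatch list is empty
        rw [pvFilterRange_nil _ _ (fun k hk => by simp [h])]
        simp
      · -- t is name with i and j swapped: the mismatch list is exactly [i, j]
        have hchar : ∀ k, k ≠ i → k ≠ j → t.toList.getD k ' ' = name.toList.getD k ' ' := by
          intro k hki hkj
          rw [hx]
          simp only [pvSwapN, List.getD_eq_getElem?_getD]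
          rw [List.getElem?_set_ne (fun hc => hkj hc.symm),
              List.getElem?_set_ne (fun hc => hki hc.symm)]
        have hui : t.toList.getD i ' ' = name.toList.getD j ' ' := by
          rw [hx]
          simp only [pvSwapN, List.getD_eq_getElem?_getD]
          rw [List.getElem?_set_ne (fun hc => absurd hc.symm (by omega : i ≠ j)),
              List.getElem?_set_self (by omega)]
          rfl
        have huj : t.toList.getD j ' ' = name.toList.getD i ' ' := by
          rw [hx]
          simp only [pvSwapN, List.getD_eq_getElem?_getD]
          rw [List.getElem?_set_self (by first | omega | (simp only [List.length_set]; omega))]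
          rfl
        have hdneq : (List.range name.toList.length).filter
            (fun k => name.toList.getD k ' ' != t.toList.getD k ' ') = [i, j] := by
          apply pvFilterRange_pair _ i j hij hjn
          intro k hk
          by_cases hki : k = i
          · rw [hki, hui]
            have hb : (name.toList.getD i ' ' != name.toList.getD j ' ') = true := by
              simp only [bne_iff_ne, ne_eq]; exact hne
            rw [hb]
            simp
          · by_cases hkj : k = j
            · rw [hkj, huj]
              have hb : (name.toList.getD j ' ' != name.toList.getD i ' ') = true := by
                simp only [bne_iff_ne, ne_eq]; exact fun hc => hne hc.symm
              rw [hb]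
              simp
            · rw [hchar k hki hkj]
              simp [hki, hkj]
        rw [hdneq]
        simp only [List.map_cons, List.map_nil, List.isEmpty_cons, Bool.false_or]
        rw [pvGet_natCast name i (by omega), pvGet_natCast name j hjn,
            pvGet_natCast t i (by omega), pvGet_natCast t j (by omega)]
        simp only [Bool.and_eq_true, decide_eq_true_eq, Option.some.injEq]
        exact ⟨huj.symm, hui.symm⟩
  · -- different lengths: A skips, B's set contains only strings of name's length
    have h1 : decide (PySem.Str.len t = PySem.Str.len name) = false := by
      rw [hlenname, hlent]
      simp only [decide_eq_false_iff_not]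
      omega
    rw [h1, Bool.false_and, Bool.eq_iff_iff, PySem.Set.contains_iff, pvMem_candidates]
    simp only [Bool.false_eq_true, false_iff]
    rintro (h | ⟨i, j, _, _, _, hx⟩)
    · exact hlen (by rw [h])
    · exact hlen (by rw [hx, pvLength_swapN])

theorem pvAOuter_filter (name : String) (l acc : List String) :
    pvAOuter name l acc =
      acc ++ l.filter (fun t => PySem.Set.contains (pvCandidates name) t.toList) := by
  induction l generalizing acc with
  | nil => simp [pvAOuter]
  | cons t l ih =>
    have hb := pvCheck_eq name t
    simp only [pvAOuter, List.filter_cons, ← hb]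
    by_cases hlen : PySem.Str.len t = PySem.Str.len name
    · by_cases hc : pvALoop name t (PySem.List.pyRange 0 (PySem.Str.len name) 1) false 0 false false = true
      · simp only [hlen, hc, ih]
        split <;> simp_all
      · simp only [hlen, hc, ih]
        split <;> simp_all
    · rw [if_pos hlen, ih]
      have hL : ¬ t.length = name.length := by
        rw [PySem.Str.len_eq, PySem.Str.len_eq] at hlen
        simpa using hlen
      simp [hL]

-- ===== VERDICT (by name: the statement is the Claim_ definition above) =====
theorem findSimilarRestaurants_spec : Claim_equal_findSimilarRestaurants := by
  intro name inputList _
  unfold Spec_findSimilarRestaurants findSimilarRestaurants findSimilarRestaurants_alt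
  simpa using pvAOuter_filter name inputList []
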